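-- pv_equiv track=rewrite | github.com/JiyooonPark/Algorithm | arrays/Question4.py | toLinear2
-- ===== SOURCE A (Python) =====
-- def toLinear2(A):
--     B = list()
--     for i in A:
--         if i == 0:
--             B.append(0)
--     for i in range(len(A) - len(B)):
--         B.append(1)
--
--     return B
-- ===== SOURCE B (Python) =====
-- def toLinear2(A):
--     return sorted(0 if i == 0 else 1 for i in A)
-- ===== Notes on version B (the rewrite author's own statement) =====
-- stated objective: simpler
-- what changed: B maps each element to its class (0 if == 0 else 1) and sorts the 0/1 list, instead of counting zeros in one loop and appending ones in a second range loop.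
import Mathlib
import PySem

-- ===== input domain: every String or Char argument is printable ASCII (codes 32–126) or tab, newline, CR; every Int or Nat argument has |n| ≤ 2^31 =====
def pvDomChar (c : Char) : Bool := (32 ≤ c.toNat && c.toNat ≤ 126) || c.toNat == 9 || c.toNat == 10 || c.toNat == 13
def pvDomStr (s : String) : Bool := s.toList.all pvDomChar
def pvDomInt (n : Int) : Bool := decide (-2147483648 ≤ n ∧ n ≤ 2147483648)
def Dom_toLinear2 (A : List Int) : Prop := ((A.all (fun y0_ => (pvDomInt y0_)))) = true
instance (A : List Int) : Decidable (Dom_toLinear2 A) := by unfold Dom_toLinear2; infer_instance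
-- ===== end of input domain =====

-- B replaces A's two loops (collect zeros, then append ones by a range loop) by
-- mapping each element to its class (0 if == 0 else 1) and sorting; objective: simpler.

-- ===== PORT A =====
def toLinear2 (A : List Int) : List Int :=
  -- B = list(); for i in A: if i == 0: B.append(0)
  let B := A.foldl (fun acc i => if i == 0 then acc ++ [(0 : Int)] else acc) []
  -- for i in range(len(A) - len(B)): B.append(1)
  (PySem.List.pyRange 0 ((A.length : Int) - (B.length : Int)) 1).foldl
    (fun acc _ => acc ++ [(1 : Int)]) B

-- ===== PORT B =====
def toLinear2_alt (A : List Int) : List Int :=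
  PySem.List.sorted (A.map (fun i => if i == 0 then (0 : Int) else 1)) (fun x => x) false

-- ===== PRECONDITION & SPEC =====
def Spec_toLinear2 (A : List Int) (out : List Int) : Prop := out = toLinear2_alt A
instance (A : List Int) (out : List Int) : Decidable (Spec_toLinear2 A out) := by unfold Spec_toLinear2; infer_instance

-- ===== CLAIM (what is proved, stated in full; the proofs are below) =====
def Claim_equal_toLinear2 : Prop := ∀ (A : List Int), Dom_toLinear2 A → Spec_toLinear2 A (toLinear2 A)

-- ===== LEMMAS AND PROOFS =====

-- A's first loop collects one 0 per zero element.
theorem pv_loop1 (A : List Int) (acc : List Int) :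
    A.foldl (fun acc i => if i == 0 then acc ++ [(0 : Int)] else acc) acc
      = acc ++ List.replicate (A.countP (fun i => i == 0)) 0 := by
  induction A generalizing acc with
  | nil => simp
  | cons a t ih =>
    rw [List.foldl_cons]
    by_cases h : a = 0
    · rw [if_pos (by simp [h]), ih, List.countP_cons]
      simp [h, List.replicate_succ, List.append_assoc]
    · rw [if_neg (by simp [h]), ih, List.countP_cons]
      simp [h]

-- A's second loop appends one 1 per range element.
theorem pv_loop2 (l : List Int) (acc : List Int) :
    l.foldl (fun acc _ => acc ++ [(1 : Int)]) acc = acc ++ List.replicate l.length 1 := by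
  induction l generalizing acc with
  | nil => simp
  | cons a t ih => simp [List.foldl_cons, ih, List.replicate_succ, List.append_assoc]

-- A's result in closed form: zeros then ones.
theorem pv_A_closed (A : List Int) :
    toLinear2 A = List.replicate (A.countP (fun i => i == 0)) 0
      ++ List.replicate (A.length - A.countP (fun i => i == 0)) 1 := by
  have hz : A.countP (fun i => i == 0) ≤ A.length := List.countP_le_length
  unfold toLinear2
  rw [pv_loop1, pv_loop2]
  simp [PySem.List.length_pyRange_one]

-- B's mapped list is a permutation of zeros-then-ones.
theorem pv_perm (A : List Int) :
    (List.replicate (A.countP (fun i => i == 0)) (0 : Int)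
      ++ List.replicate (A.length - A.countP (fun i => i == 0)) 1).Perm
      (A.map (fun i => if i == 0 then (0 : Int) else 1)) := by
  induction A with
  | nil => simp
  | cons a t ih =>
    have hz : t.countP (fun i => i == 0) ≤ t.length := List.countP_le_length
    by_cases h : a = 0
    · simpa [List.countP_cons, h, List.replicate_succ, Nat.succ_sub hz] using ih.cons 0
    · have hlen : t.length + 1 - t.countP (fun i => i == 0)
          = (t.length - t.countP (fun i => i == 0)) + 1 := by omega
      have e1 : (if a == 0 then (0 : Int) else 1) = 1 := by simp [h]
      have e2 : List.countP (fun i => i == 0) (a :: t) = List.countP (fun i => i == 0) t := by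
        simp [h]
      rw [List.map_cons, e1, e2, List.length_cons, hlen, List.replicate_succ]
      exact (List.perm_middle.trans (ih.cons 1))

theorem pv_pairwise (z m : Nat) :
    (List.replicate z (0 : Int) ++ List.replicate m 1).Pairwise (· ≤ ·) := by
  rw [List.pairwise_append]
  refine ⟨List.pairwise_replicate.2 (by simp), List.pairwise_replicate.2 (by simp), ?_⟩
  intro x hx y hy
  rw [List.eq_of_mem_replicate hx, List.eq_of_mem_replicate hy]
  norm_num

-- ===== VERDICT (by name: the statement is the Claim_ definition above) =====
theorem toLinear2_spec : Claim_equal_toLinear2 := by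
  intro A _
  unfold Spec_toLinear2 toLinear2_alt
  rw [pv_A_closed]
  exact (PySem.List.sorted_id_eq_of_perm_of_pairwise _ _ (pv_perm A) (pv_pairwise _ _)).symm
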